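-- pv_equiv track=rewrite | github.com/NeapolitanIcecream/cremona | src/cremona/core/engine.py | _routing_pressure
-- ===== SOURCE A (Python) =====
-- from typing import Any, Callable, Iterable, Literal
--
-- def _routing_pressure(agent_routing_queue: list[dict[str, Any]]) -> str:
--     if any(item["priority_band"] == "investigate_now" for item in agent_routing_queue):
--         return "investigate_now"
--     if any(
--         item["priority_band"] == "investigate_soon" for item in agent_routing_queue
--     ):
--         return "investigate_soon"
--     if agent_routing_queue:
--         return "watch_only"
--     return "none"
-- ===== SOURCE B (Python) =====
-- def _routing_pressure(agent_routing_queue: list[dict[str, object]]) -> str: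
--     rank = {"investigate_now": 3, "investigate_soon": 2}
--     severity = 0
--     for item in agent_routing_queue:
--         severity = max(severity, rank.get(item["priority_band"], 1))
--         if severity == 3:
--             break
--     return ["none", "watch_only", "investigate_soon", "investigate_now"][severity]
-- ===== Notes on version B (the rewrite author's own statement) =====
-- stated objective: alternative
-- what changed: Replaces A's staged any() scans and branch chain by a severity-lattice reduction: items are mapped through a rank table (now=3, soon=2, other=1), a running max is folded with saturation at 3 (break), and the result indexes a label table.
import Mathlib
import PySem

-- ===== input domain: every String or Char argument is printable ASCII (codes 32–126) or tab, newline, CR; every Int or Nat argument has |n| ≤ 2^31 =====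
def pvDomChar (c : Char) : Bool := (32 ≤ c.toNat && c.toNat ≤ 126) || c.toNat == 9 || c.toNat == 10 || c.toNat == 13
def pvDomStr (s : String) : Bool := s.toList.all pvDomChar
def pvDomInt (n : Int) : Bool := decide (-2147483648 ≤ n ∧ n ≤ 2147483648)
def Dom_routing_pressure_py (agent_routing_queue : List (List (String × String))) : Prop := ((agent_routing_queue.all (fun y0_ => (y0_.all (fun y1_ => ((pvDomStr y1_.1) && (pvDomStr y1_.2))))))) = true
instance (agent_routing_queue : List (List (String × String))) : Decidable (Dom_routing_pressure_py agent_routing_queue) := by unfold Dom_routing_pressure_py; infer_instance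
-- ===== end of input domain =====

-- B replaces A's staged any() scans and branch chain by a severity-lattice reduction: rank table, running max saturating at 3, label table (alternative decomposition, same cost).

-- ===== PORT A =====
-- any(item["priority_band"] == band for item in q); a missing key (Python KeyError) is outside
-- Pre_ below, so the getD "" default is unreachable on admitted inputs.
def pvAnyBand (band : String) : List (List (String × String)) → Bool
  | [] => false
  | item :: rest =>
    if (((PySem.Dict.mk item).get? "priority_band").getD "") == band then true
    else pvAnyBand band rest

def routing_pressure_py (agent_routing_queue : List (List (String × String))) : String :=
  if pvAnyBand "investigate_now" agent_routing_queue then "investigate_now"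
  else if pvAnyBand "investigate_soon" agent_routing_queue then "investigate_soon"
  else if agent_routing_queue.isEmpty then "none" else "watch_only"

-- ===== PORT B =====
-- rank.get(item["priority_band"], 1); missing key is outside Pre_, so getD "" is unreachable.
def pvRankB (item : List (String × String)) : Nat :=
  ((PySem.Dict.mk [("investigate_now", 3), ("investigate_soon", 2)]).get?
      (((PySem.Dict.mk item).get? "priority_band").getD "")).getD 1

-- the loop: severity = max(severity, rank); break once saturated at 3
def pvSevLoop : List (List (String × String)) → Nat → Nat
  | [], sev => sev
  | item :: rest, sev =>
    let sev' := max sev (pvRankB item)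
    if sev' == 3 then sev' else pvSevLoop rest sev'

def routing_pressure_py_alt (agent_routing_queue : List (List (String × String))) : String :=
  ["none", "watch_only", "investigate_soon", "investigate_now"].getD
    (pvSevLoop agent_routing_queue 0) ""

-- ===== PRECONDITION & SPEC =====
-- Pre_ excludes exactly the inputs where Python A raises KeyError: an item without the
-- "priority_band" key reached before any "investigate_now" item (B raises there too).
def Pre_routing_pressure_py (agent_routing_queue : List (List (String × String))) : Prop :=
  (∀ item ∈ agent_routing_queue, ((PySem.Dict.mk item).get? "priority_band").isSome) ∨
  ("investigate_now" ∈ (agent_routing_queue.takeWhile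
      (fun item => ((PySem.Dict.mk item).get? "priority_band").isSome)).map
      (fun item => ((PySem.Dict.mk item).get? "priority_band").getD ""))
instance (agent_routing_queue : List (List (String × String))) : Decidable (Pre_routing_pressure_py agent_routing_queue) := by unfold Pre_routing_pressure_py; infer_instance

def pvWitness_routing_pressure_py : (List (List (String × String))) :=
  [[("priority_band", "investigate_soon")], [("priority_band", "watch")]]

def Spec_routing_pressure_py (agent_routing_queue : List (List (String × String))) (out : String) : Prop := out = routing_pressure_py_alt agent_routing_queue
instance (agent_routing_queue : List (List (String × String))) (out : String) : Decidable (Spec_routing_pressure_py agent_routing_queue out) := by unfold Spec_routing_pressure_py; infer_instance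

-- ===== CLAIM (what is proved, stated in full; the proofs are below) =====
def Claim_equal_routing_pressure_py : Prop := ∀ (agent_routing_queue : List (List (String × String))), Dom_routing_pressure_py agent_routing_queue → Pre_routing_pressure_py agent_routing_queue → Spec_routing_pressure_py agent_routing_queue (routing_pressure_py agent_routing_queue)

-- ===== LEMMAS AND PROOFS =====
-- the saturating max-loop computes exactly the severity level A's branch chain decides
theorem pvSevLoop_spec (q : List (List (String × String))) : ∀ sev : Nat, sev ≤ 2 →
    pvSevLoop q sev =
      max sev
        (if pvAnyBand "investigate_now" q then 3
         else if pvAnyBand "investigate_soon" q then 2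
         else if q.isEmpty then 0 else 1) := by
  induction q with
  | nil => intro sev _; simp [pvSevLoop, pvAnyBand]
  | cons item rest ih =>
    intro sev hsev
    by_cases hnow : (((PySem.Dict.mk item).get? "priority_band").getD "") = "investigate_now"
    · have hr : pvRankB item = 3 := by simp only [pvRankB, hnow]; decide
      have c1 : pvAnyBand "investigate_now" (item :: rest) = true := by
        simp [pvAnyBand, hnow]
      simp only [pvSevLoop, hr, c1, if_true]
      have hm : max sev 3 = 3 := by omega
      simp [hm]
    · have c1 : pvAnyBand "investigate_now" (item :: rest) = pvAnyBand "investigate_now" rest := by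
        simp [pvAnyBand, hnow]
      by_cases hsoon : (((PySem.Dict.mk item).get? "priority_band").getD "") = "investigate_soon"
      · have hr : pvRankB item = 2 := by simp only [pvRankB, hsoon]; decide
        have c2 : pvAnyBand "investigate_soon" (item :: rest) = true := by
          simp [pvAnyBand, hsoon]
        simp only [pvSevLoop, hr, c1, c2, if_true]
        have hne : (max sev 2 == 3) = false := by
          simp only [beq_eq_false_iff_ne]; omega
        rw [hne]
        simp only [Bool.false_eq_true, if_false]
        rw [ih (max sev 2) (by omega)]
        split_ifs <;> omega
      · have hb1 : ("investigate_now" == (((PySem.Dict.mk item).get? "priority_band").getD "")) = false :=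
          beq_eq_false_iff_ne.mpr (Ne.symm hnow)
        have hb2 : ("investigate_soon" == (((PySem.Dict.mk item).get? "priority_band").getD "")) = false :=
          beq_eq_false_iff_ne.mpr (Ne.symm hsoon)
        have hr : pvRankB item = 1 := by
          simp only [PySem.Dict.get?] at hb1 hb2
          simp [pvRankB, PySem.Dict.get?, List.find?, hb1, hb2]
        have c2 : pvAnyBand "investigate_soon" (item :: rest) = pvAnyBand "investigate_soon" rest := by
          simp [pvAnyBand, hsoon]
        simp only [pvSevLoop, hr, c1, c2]
        have hne : (max sev 1 == 3) = false := by
          simp only [beq_eq_false_iff_ne]; omega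
        rw [hne]
        simp only [Bool.false_eq_true, if_false, List.isEmpty_cons]
        rw [ih (max sev 1) (by omega)]
        split_ifs <;> omega

-- ===== VERDICT (by name: the statement is the Claim_ definition above) =====
theorem routing_pressure_py_spec : Claim_equal_routing_pressure_py := by
  intro q _ _
  unfold Spec_routing_pressure_py routing_pressure_py routing_pressure_py_alt
  rw [pvSevLoop_spec q 0 (by omega)]
  simp only [Nat.zero_max]
  by_cases hnow : pvAnyBand "investigate_now" q
  · simp [hnow]
  · by_cases hsoon : pvAnyBand "investigate_soon" q
    · simp [hnow, hsoon]
    · by_cases hemp : q.isEmpty <;> simp [hnow, hsoon, hemp]
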